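-- pv_equiv track=rewrite | github.com/craiguffman/maga-christianism-project | tools/scripts/tana_readwise_integration_enhanced.py | determine_content_type
-- ===== SOURCE A (Python) =====
-- CONTENT_TYPE_MAP = {
--     # Legacy system
--     "#permanent_note": "note",
--     "#claim": "note",
--     "#question": "question",
--     "#evidence": "note",
--     "#quote": "quote",
--
--     # New SN(A)CK system
--     "#highlight": "highlight",
--     "#summary": "note",
--     "#note": "note",
--     "#analysis": "note",
--     "#connection": "note",
--     "#key": "note"
-- }
--
-- CONTENT_TYPE_PRIORITY = [
--     # New SN(A)CK system (higher priority)
--     "#highlight",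
--     "#summary",
--     "#note",
--     "#analysis",
--     "#connection",
--     "#key",
--
--     # Legacy system
--     "#quote",
--     "#evidence",
--     "#claim",
--     "#question",
--     "#permanent_note"
-- ]
--
-- def determine_content_type(tags):
--     """Determine the content type based on tags from either system."""
--     # Process tags to handle SN(A)CK format
--     processed_tags = []
--     for tag in tags:
--         if "SN(A)CK" in tag:
--             # Get the tag part before SN(A)CK
--             base_tag = tag.split()[0]
--             processed_tags.append(base_tag)
--         else:
--             processed_tags.append(tag)
--
--     # Find all matching content type tags
--     content_types = [tag for tag in processed_tags if tag in CONTENT_TYPE_MAP]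
--
--     # If multiple content types are found, use priority order
--     if len(content_types) > 1:
--         for content_type in CONTENT_TYPE_PRIORITY:
--             if content_type in content_types:
--                 return CONTENT_TYPE_MAP[content_type]
--
--     # If one content type is found, use it
--     if len(content_types) == 1:
--         return CONTENT_TYPE_MAP[content_types[0]]
--
--     # Default to note if no content type tag is found
--     return "note"
-- ===== SOURCE B (Python) =====
-- CONTENT_TYPE_MAP = {
--     "#permanent_note": "note",
--     "#claim": "note",
--     "#question": "question",
--     "#evidence": "note",
--     "#quote": "quote",
--     "#highlight": "highlight",
--     "#summary": "note",
--     "#note": "note",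
--     "#analysis": "note",
--     "#connection": "note",
--     "#key": "note"
-- }
--
-- CONTENT_TYPE_PRIORITY = [
--     "#highlight", "#summary", "#note", "#analysis", "#connection", "#key",
--     "#quote", "#evidence", "#claim", "#question", "#permanent_note"
-- ]
--
--
-- def determine_content_type(tags):
--     """Priority-major scan: for each content-type tag in priority order,
--     return its mapped type as soon as some (SN(A)CK-normalised) tag equals it."""
--     def norm(tag):
--         return tag.split()[0] if "SN(A)CK" in tag else tag
--     for p in CONTENT_TYPE_PRIORITY:
--         if any(norm(t) == p for t in tags):
--             return CONTENT_TYPE_MAP[p]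
--     return "note"
-- ===== Notes on version B (the rewrite author's own statement) =====
-- stated objective: simpler
-- what changed: B replaces A's three-phase tag-major pipeline (build processed list, filter to content-type matches, branch on 0/1/many with a separate priority loop) by a single priority-major scan that returns the map value of the first priority tag some normalised input tag equals; correct because every CONTENT_TYPE_MAP key occurs in CONTENT_TYPE_PRIORITY.
import Mathlib
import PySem

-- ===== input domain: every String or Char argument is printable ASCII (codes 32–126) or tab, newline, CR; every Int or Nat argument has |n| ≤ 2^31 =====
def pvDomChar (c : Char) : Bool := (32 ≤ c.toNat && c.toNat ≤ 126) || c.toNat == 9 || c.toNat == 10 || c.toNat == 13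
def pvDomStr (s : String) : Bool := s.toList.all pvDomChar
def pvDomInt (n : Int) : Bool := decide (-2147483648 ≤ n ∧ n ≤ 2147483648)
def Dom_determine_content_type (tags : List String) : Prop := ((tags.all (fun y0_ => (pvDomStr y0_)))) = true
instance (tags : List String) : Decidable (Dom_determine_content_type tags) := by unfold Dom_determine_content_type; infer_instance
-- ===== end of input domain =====

-- B re-implements A as one priority-major scan (no intermediate matched-tags list, no 0/1/many branching); same cost, simpler.

-- ===== PORT A =====
-- CONTENT_TYPE_MAP (module constant, insertion order)
def ctMapA : PySem.Dict String String := PySem.Dict.ofList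
  [("#permanent_note", "note"), ("#claim", "note"), ("#question", "question"),
   ("#evidence", "note"), ("#quote", "quote"),
   ("#highlight", "highlight"), ("#summary", "note"), ("#note", "note"),
   ("#analysis", "note"), ("#connection", "note"), ("#key", "note")]

-- CONTENT_TYPE_PRIORITY (module constant)
def ctPriorityA : List String :=
  ["#highlight", "#summary", "#note", "#analysis", "#connection", "#key",
   "#quote", "#evidence", "#claim", "#question", "#permanent_note"]

-- the priority loop ('for content_type in CONTENT_TYPE_PRIORITY: if … return …'); none = fell through.
-- CONTENT_TYPE_MAP[content_type]: the key is in the dict here, so getD's default is unreachable (exact).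
def prioLoopA (prio : List String) (cts : List String) : Option String :=
  match prio with
  | [] => none
  | p :: rest => if cts.contains p then some (PySem.Dict.getD ctMapA p "") else prioLoopA rest cts

def determine_content_type (tags : List String) : String :=
  -- the tag-processing loop, appending to processed_tags
  -- tag.split()[0]: 'SN(A)CK' in tag guarantees a non-whitespace char, so split() is nonempty and the getD "" is unreachable (exact)
  let processed := tags.foldl (fun acc tag =>
    if PySem.Str.isIn "SN(A)CK" tag then acc ++ [(PySem.List.pyGet? (PySem.Str.split₀ tag) 0).getD ""]
    else acc ++ [tag]) []
  -- content_types = [tag for tag in processed_tags if tag in CONTENT_TYPE_MAP]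
  let content_types := processed.filter (fun t => PySem.Dict.contains ctMapA t)
  if 1 < content_types.length then
    match prioLoopA ctPriorityA content_types with
    | some v => v
    | none =>
      if content_types.length == 1 then PySem.Dict.getD ctMapA ((PySem.List.pyGet? content_types 0).getD "") "" else "note"
  else
    if content_types.length == 1 then PySem.Dict.getD ctMapA ((PySem.List.pyGet? content_types 0).getD "") "" else "note"

-- ===== PORT B =====
def ctMapB : PySem.Dict String String := PySem.Dict.ofList
  [("#permanent_note", "note"), ("#claim", "note"), ("#question", "question"),
   ("#evidence", "note"), ("#quote", "quote"),
   ("#highlight", "highlight"), ("#summary", "note"), ("#note", "note"),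
   ("#analysis", "note"), ("#connection", "note"), ("#key", "note")]

def ctPriorityB : List String :=
  ["#highlight", "#summary", "#note", "#analysis", "#connection", "#key",
   "#quote", "#evidence", "#claim", "#question", "#permanent_note"]

-- norm(tag): tag.split()[0] if "SN(A)CK" in tag else tag (getD "" unreachable as in port A, exact)
def normB (tag : String) : String :=
  if PySem.Str.isIn "SN(A)CK" tag then (PySem.List.pyGet? (PySem.Str.split₀ tag) 0).getD "" else tag

-- for p in CONTENT_TYPE_PRIORITY: if any(norm(t) == p for t in tags): return CONTENT_TYPE_MAP[p]; return "note"
def prioScanB (prio : List String) (tags : List String) : String :=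
  match prio with
  | [] => "note"
  | p :: rest => if tags.any (fun t => normB t == p) then PySem.Dict.getD ctMapB p "" else prioScanB rest tags

def determine_content_type_alt (tags : List String) : String :=
  prioScanB ctPriorityB tags

-- ===== PRECONDITION & SPEC =====
def Spec_determine_content_type (tags : List String) (out : String) : Prop := out = determine_content_type_alt tags
instance (tags : List String) (out : String) : Decidable (Spec_determine_content_type tags out) := by unfold Spec_determine_content_type; infer_instance

-- ===== CLAIM (what is proved, stated in full; the proofs are below) =====
def Claim_equal_determine_content_type : Prop := ∀ (tags : List String), Dom_determine_content_type tags → Spec_determine_content_type tags (determine_content_type tags)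

-- ===== LEMMAS AND PROOFS =====
theorem lem_foldl_eq_map (tags : List String) :
    tags.foldl (fun acc tag =>
      if PySem.Str.isIn "SN(A)CK" tag then acc ++ [(PySem.List.pyGet? (PySem.Str.split₀ tag) 0).getD ""]
      else acc ++ [tag]) [] = tags.map normB := by
  have h : (fun (acc : List String) (tag : String) =>
      if PySem.Str.isIn "SN(A)CK" tag then acc ++ [(PySem.List.pyGet? (PySem.Str.split₀ tag) 0).getD ""]
      else acc ++ [tag]) = fun acc tag => acc ++ [normB tag] := by
    funext acc tag; unfold normB; split <;> rfl
  rw [h, PySem.List.foldl_append_singleton_eq_map]; rfl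

-- a map key is in the filtered list iff it is in the original list
theorem lem_contains_filter (p : String) (hp : PySem.Dict.contains ctMapA p = true)
    (L : List String) :
    (L.filter (fun t => PySem.Dict.contains ctMapA t)).contains p = L.contains p := by
  rw [Bool.eq_iff_iff, List.contains_iff_mem, List.contains_iff_mem, List.mem_filter]
  exact ⟨fun h => h.1, fun h => ⟨h, hp⟩⟩

theorem lem_contains_map (f : String → String) (p : String) (L : List String) :
    (L.map f).contains p = L.any (fun t => f t == p) := by
  rw [Bool.eq_iff_iff, List.contains_iff_mem, List.any_eq_true]
  constructor
  · intro hm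
    obtain ⟨t, ht, rfl⟩ := List.mem_map.mp hm
    exact ⟨t, ht, by simp⟩
  · rintro ⟨t, ht, he⟩
    exact List.mem_map.mpr ⟨t, ht, by simpa using he⟩

-- enumerate the keys of CONTENT_TYPE_MAP
theorem lem_key_elim (x : String) (hx : PySem.Dict.contains ctMapA x = true) :
    x = "#permanent_note" ∨ x = "#claim" ∨ x = "#question" ∨ x = "#evidence" ∨ x = "#quote" ∨
    x = "#highlight" ∨ x = "#summary" ∨ x = "#note" ∨ x = "#analysis" ∨ x = "#connection" ∨
    x = "#key" := by
  rw [PySem.Dict.contains_iff_mem_keys] at hx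
  have hk : ctMapA.keys = ["#permanent_note","#claim","#question","#evidence","#quote",
      "#highlight","#summary","#note","#analysis","#connection","#key"] := by decide
  rw [hk] at hx
  simpa using hx

-- every map key occurs in the priority list
theorem lem_key_mem_prio (x : String) (hx : PySem.Dict.contains ctMapA x = true) : x ∈ ctPriorityA := by
  rcases lem_key_elim x hx with h|h|h|h|h|h|h|h|h|h|h <;> subst h <;> decide

theorem lem_prioLoop_some (x : String) (hx : x ∈ ctPriorityA) :
    ∀ (cts : List String), cts.contains x = true → (prioLoopA ctPriorityA cts).isSome := by
  have : ∀ (prio : List String), x ∈ prio → ∀ cts : List String, cts.contains x = true →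
      (prioLoopA prio cts).isSome := by
    intro prio
    induction prio with
    | nil => intro h; simp at h
    | cons p rest ih =>
      intro hmem cts hc
      unfold prioLoopA
      by_cases hcp : cts.contains p = true
      · rw [if_pos hcp]; rfl
      · rw [if_neg hcp]
        rcases List.mem_cons.mp hmem with h|h
        · subst h; exact absurd hc hcp
        · exact ih h cts hc
  exact this ctPriorityA hx

theorem lem_scan_bridge (tags : List String) :
    ∀ (prio : List String), (∀ p ∈ prio, PySem.Dict.contains ctMapA p = true) →
      prioScanB prio tags =
        (prioLoopA prio ((tags.map normB).filter (fun t => PySem.Dict.contains ctMapA t))).getD "note" := by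
  intro prio
  induction prio with
  | nil => intro _; rfl
  | cons p rest ih =>
    intro hkeys
    have hp : PySem.Dict.contains ctMapA p = true := hkeys p (List.mem_cons_self ..)
    have hcond : ((tags.map normB).filter (fun t => PySem.Dict.contains ctMapA t)).contains p
        = tags.any (fun t => normB t == p) := by
      rw [lem_contains_filter p hp, lem_contains_map]
    unfold prioScanB prioLoopA
    rw [hcond]
    by_cases h : tags.any (fun t => normB t == p) = true
    · rw [if_pos h, if_pos h]; rfl
    · rw [if_neg h, if_neg h]
      exact ih (fun q hq => hkeys q (List.mem_cons_of_mem _ hq))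

-- the key of a single matched tag is the first (and only) priority hit
theorem lem_single (x : String) (hx : PySem.Dict.contains ctMapA x = true) :
    prioLoopA ctPriorityA [x] = some (PySem.Dict.getD ctMapA x "") := by
  rcases lem_key_elim x hx with h|h|h|h|h|h|h|h|h|h|h <;> subst h <;> decide

theorem lem_prio_keys : ∀ p ∈ ctPriorityA, PySem.Dict.contains ctMapA p = true := by decide

-- A's branching on the filtered list equals the single priority scan with default "note"
theorem lem_A_branch (cts : List String)
    (hk : ∀ t ∈ cts, PySem.Dict.contains ctMapA t = true) :
    (if 1 < cts.length then
      match prioLoopA ctPriorityA cts with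
      | some v => v
      | none =>
        if cts.length == 1 then PySem.Dict.getD ctMapA ((PySem.List.pyGet? cts 0).getD "") "" else "note"
    else
      if cts.length == 1 then PySem.Dict.getD ctMapA ((PySem.List.pyGet? cts 0).getD "") "" else "note")
    = (prioLoopA ctPriorityA cts).getD "note" := by
  match cts with
  | [] => decide
  | [x] =>
    have hx := hk x (by simp)
    have hget : (PySem.List.pyGet? [x] 0).getD "" = x := rfl
    rw [hget]
    simp [lem_single x hx]
  | x :: y :: rest =>
    have hx := hk x (by simp)
    have hsome := lem_prioLoop_some x (lem_key_mem_prio x hx) (x :: y :: rest) (by simp)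
    simp only [List.length_cons, show (1 : Nat) < rest.length + 1 + 1 by omega, if_pos]
    cases hres : prioLoopA ctPriorityA (x :: y :: rest) with
    | none => rw [hres] at hsome; simp at hsome
    | some v => simp

-- ===== VERDICT (by name: the statement is the Claim_ definition above) =====
theorem determine_content_type_spec : Claim_equal_determine_content_type := by
  intro tags _
  unfold Spec_determine_content_type determine_content_type determine_content_type_alt
  simp only [lem_foldl_eq_map]
  rw [lem_A_branch _ (fun t ht => (List.mem_filter.mp ht).2)]
  rw [lem_scan_bridge tags ctPriorityB lem_prio_keys]
  rfl
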